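-- pv_equiv track=rewrite | github.com/inderanz/anzx-ai-virtual-agents | services/core-api/app/services/conversation_context.py | _determine_conversation_stage
-- ===== SOURCE A (Python) =====
-- def _determine_conversation_stage(message: str, current_stage: str) -> str:
--     """Determine conversation stage based on message"""
--     message_lower = message.lower()
--
--     # Stage transition logic
--     if current_stage == "greeting":
--         if any(word in message_lower for word in ["help", "problem", "issue", "need"]):
--             return "information_gathering"
--
--     elif current_stage == "information_gathering":
--         if any(word in message_lower for word in ["try", "solution", "fix", "resolve"]):
--             return "problem_solving"
--
--     elif current_stage == "problem_solving":
--         if any(word in message_lower for word in ["thanks", "solved", "fixed", "working", "resolved"]):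
--             return "resolution"
--         elif any(word in message_lower for word in ["still", "not working", "didn't work"]):
--             return "information_gathering"  # Back to gathering more info
--
--     return current_stage
-- ===== SOURCE B (Python) =====
-- # Flat rule relation + collect-then-select: instead of an ordered early-return
-- # branch chain, gather ALL matching transitions and pick the highest-priority one.
-- _RULES = [
--     ("greeting", ("help", "problem", "issue", "need"), "information_gathering"),
--     ("information_gathering", ("try", "solution", "fix", "resolve"), "problem_solving"),
--     ("problem_solving", ("thanks", "solved", "fixed", "working", "resolved"), "resolution"),
--     ("problem_solving", ("still", "not working", "didn't work"), "information_gathering"),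
-- ]
--
--
-- def _determine_conversation_stage(message: str, current_stage: str) -> str:
--     """Determine conversation stage based on message (collect matches, select best)."""
--     m = message.lower()
--     candidates = [
--         (prio, target)
--         for prio, (stage, keywords, target) in enumerate(_RULES)
--         if stage == current_stage and any(kw in m for kw in keywords)
--     ]
--     return min(candidates)[1] if candidates else current_stage
-- ===== Notes on version B (the rewrite author's own statement) =====
-- stated objective: alternative
-- what changed: Replaced the ordered if/elif early-return chain with a flat rule relation that is evaluated exhaustively: a comprehension collects every matching (priority, target) transition and min() selects the best, instead of returning at the first hit.
import Mathlib
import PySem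

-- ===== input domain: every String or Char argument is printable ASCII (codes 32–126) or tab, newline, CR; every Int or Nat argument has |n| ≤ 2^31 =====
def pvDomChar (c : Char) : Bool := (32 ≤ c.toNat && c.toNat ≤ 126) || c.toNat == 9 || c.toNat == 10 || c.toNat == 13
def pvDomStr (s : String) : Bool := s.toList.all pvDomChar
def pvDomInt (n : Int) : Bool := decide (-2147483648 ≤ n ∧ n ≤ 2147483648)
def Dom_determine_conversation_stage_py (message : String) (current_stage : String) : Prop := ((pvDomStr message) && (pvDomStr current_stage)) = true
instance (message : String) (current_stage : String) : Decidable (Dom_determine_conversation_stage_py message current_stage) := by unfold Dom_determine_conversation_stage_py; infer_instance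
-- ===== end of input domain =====

-- B flattens the branch chain into a flat rule relation evaluated exhaustively (collect all
-- matching transitions, select the minimal-priority one) instead of returning at the first hit.

-- ===== PORT A =====
def determine_conversation_stage_py (message : String) (current_stage : String) : String :=
  let message_lower := PySem.Str.lower message
  if current_stage == "greeting" then
    if ["help", "problem", "issue", "need"].any (fun word => PySem.Str.isIn word message_lower) then
      "information_gathering"
    else current_stage
  else if current_stage == "information_gathering" then
    if ["try", "solution", "fix", "resolve"].any (fun word => PySem.Str.isIn word message_lower) then
      "problem_solving"
    else current_stage
  else if current_stage == "problem_solving" then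
    if ["thanks", "solved", "fixed", "working", "resolved"].any (fun word => PySem.Str.isIn word message_lower) then
      "resolution"
    else if ["still", "not working", "didn't work"].any (fun word => PySem.Str.isIn word message_lower) then
      "information_gathering"
    else current_stage
  else current_stage

-- ===== PORT B =====
-- flat rule relation: (source stage, keywords, target stage)
def PV_RULES : List (String × List String × String) :=
  [("greeting", ["help", "problem", "issue", "need"], "information_gathering"),
   ("information_gathering", ["try", "solution", "fix", "resolve"], "problem_solving"),
   ("problem_solving", ["thanks", "solved", "fixed", "working", "resolved"], "resolution"),
   ("problem_solving", ["still", "not working", "didn't work"], "information_gathering")]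

def determine_conversation_stage_py_alt (message : String) (current_stage : String) : String :=
  let m := PySem.Str.lower message
  -- the comprehension over enumerate(_RULES): collect (prio, target) for every matching rule
  let candidates : List (Int × String) :=
    ((PySem.List.enumerate PV_RULES).filter
        (fun pr => pr.2.1 == current_stage && pr.2.2.1.any (fun kw => PySem.Str.isIn kw m))).map
      (fun pr => (pr.1, pr.2.2.2))
  -- min(candidates)[1] if candidates else current_stage  (tuple min = min2? on the components)
  match PySem.List.min2? candidates Prod.fst Prod.snd with
  | some c => c.2
  | none => current_stage

-- ===== PRECONDITION & SPEC =====
def Spec_determine_conversation_stage_py (message : String) (current_stage : String) (out : String) : Prop := out = determine_conversation_stage_py_alt message current_stage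
instance (message : String) (current_stage : String) (out : String) : Decidable (Spec_determine_conversation_stage_py message current_stage out) := by unfold Spec_determine_conversation_stage_py; infer_instance

-- ===== CLAIM (what is proved, stated in full; the proofs are below) =====
def Claim_equal_determine_conversation_stage_py : Prop := ∀ (message : String) (current_stage : String), Dom_determine_conversation_stage_py message current_stage → Spec_determine_conversation_stage_py message current_stage (determine_conversation_stage_py message current_stage)

-- ===== LEMMAS AND PROOFS =====

-- ===== VERDICT (by name: the statement is the Claim_ definition above) =====
theorem determine_conversation_stage_py_spec : Claim_equal_determine_conversation_stage_py := by
  intro message current_stage _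
  unfold Spec_determine_conversation_stage_py determine_conversation_stage_py determine_conversation_stage_py_alt
  by_cases h1 : current_stage = "greeting"
  · subst h1
    simp [PV_RULES, PySem.List.enumerate, PySem.List.enumerate_cons, List.filter, PySem.List.min2?]
    generalize PySem.Chars.isIn ['h','e','l','p'] (PySem.Chars.lower message.toList) = b1
    generalize PySem.Chars.isIn ['p','r','o','b','l','e','m'] (PySem.Chars.lower message.toList) = b2
    generalize PySem.Chars.isIn ['i','s','s','u','e'] (PySem.Chars.lower message.toList) = b3
    generalize PySem.Chars.isIn ['n','e','e','d'] (PySem.Chars.lower message.toList) = b4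
    revert b1 b2 b3 b4
    decide
  · by_cases h2 : current_stage = "information_gathering"
    · subst h2
      simp [PV_RULES, PySem.List.enumerate, PySem.List.enumerate_cons, List.filter, PySem.List.min2?]
      generalize PySem.Chars.isIn ['t','r','y'] (PySem.Chars.lower message.toList) = b1
      generalize PySem.Chars.isIn ['s','o','l','u','t','i','o','n'] (PySem.Chars.lower message.toList) = b2
      generalize PySem.Chars.isIn ['f','i','x'] (PySem.Chars.lower message.toList) = b3
      generalize PySem.Chars.isIn ['r','e','s','o','l','v','e'] (PySem.Chars.lower message.toList) = b4
      revert b1 b2 b3 b4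
      decide
    · by_cases h3 : current_stage = "problem_solving"
      · subst h3
        simp [PV_RULES, PySem.List.enumerate, PySem.List.enumerate_cons, List.filter, PySem.List.min2?]
        generalize PySem.Chars.isIn ['t','h','a','n','k','s'] (PySem.Chars.lower message.toList) = b1
        generalize PySem.Chars.isIn ['s','o','l','v','e','d'] (PySem.Chars.lower message.toList) = b2
        generalize PySem.Chars.isIn ['f','i','x','e','d'] (PySem.Chars.lower message.toList) = b3
        generalize PySem.Chars.isIn ['w','o','r','k','i','n','g'] (PySem.Chars.lower message.toList) = b4
        generalize PySem.Chars.isIn ['r','e','s','o','l','v','e','d'] (PySem.Chars.lower message.toList) = b5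
        generalize PySem.Chars.isIn ['s','t','i','l','l'] (PySem.Chars.lower message.toList) = b6
        generalize PySem.Chars.isIn ['n','o','t',' ','w','o','r','k','i','n','g'] (PySem.Chars.lower message.toList) = b7
        generalize PySem.Chars.isIn ['d','i','d','n','\'','t',' ','w','o','r','k'] (PySem.Chars.lower message.toList) = b8
        revert b1 b2 b3 b4 b5 b6 b7 b8
        decide
      · have g1 : ("greeting" == current_stage) = false := by simp [Ne.symm h1]
        have g2 : ("information_gathering" == current_stage) = false := by simp [Ne.symm h2]
        have g3 : ("problem_solving" == current_stage) = false := by simp [Ne.symm h3]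
        simp [PV_RULES, PySem.List.enumerate, PySem.List.enumerate_cons, List.filter, PySem.List.min2?, g1, g2, g3, h1, h2, h3]
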